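-- pv_equiv track=rewrite | github.com/UniverseOu/ricequant-skills | skills/research/earnings-preview/scripts/generate_report.py | select_margin_metric
-- ===== SOURCE A (Python) =====
-- from typing import Any, Dict, Iterable, List, Optional, Sequence, Tuple
--
-- def select_margin_metric(rows: Sequence[Dict[str, Any]]) -> Tuple[str, str]:
--     candidates = [
--         ("gross_margin", "毛利率"),
--         ("operating_margin", "营业利润率"),
--         ("net_margin", "净利率"),
--     ]
--     for field, label in candidates:
--         if any(item.get(field) is not None for item in rows):
--             return field, label
--     return "net_margin", "净利率"
-- ===== SOURCE B (Python) =====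
-- def select_margin_metric(rows):
--     candidates = [
--         ("gross_margin", "毛利率"),
--         ("operating_margin", "营业利润率"),
--         ("net_margin", "净利率"),
--     ]
--     present = set()
--     for item in rows:
--         for field, _label in candidates:
--             if item.get(field) is not None:
--                 present.add(field)
--     for field, label in candidates:
--         if field in present:
--             return field, label
--     return "net_margin", "净利率"
-- ===== Notes on version B (the rewrite author's own statement) =====
-- stated objective: alternative
-- what changed: B makes one pass over rows building a set of candidate fields that have a non-None value, then returns the first candidate whose field is in that set, instead of A's per-candidate rescans of rows.
import Mathlib
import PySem

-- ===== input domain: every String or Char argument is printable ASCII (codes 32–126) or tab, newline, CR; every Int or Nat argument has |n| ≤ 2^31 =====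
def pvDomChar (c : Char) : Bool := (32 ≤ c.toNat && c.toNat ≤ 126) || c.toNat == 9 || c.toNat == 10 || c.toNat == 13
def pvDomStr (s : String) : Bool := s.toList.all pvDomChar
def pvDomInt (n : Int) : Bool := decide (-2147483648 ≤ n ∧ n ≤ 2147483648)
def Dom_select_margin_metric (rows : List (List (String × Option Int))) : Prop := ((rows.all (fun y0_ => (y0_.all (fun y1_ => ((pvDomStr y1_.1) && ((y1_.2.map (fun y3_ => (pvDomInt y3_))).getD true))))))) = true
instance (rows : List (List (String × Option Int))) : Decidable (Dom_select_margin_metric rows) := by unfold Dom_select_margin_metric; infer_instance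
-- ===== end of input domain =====

-- B builds the set of candidate fields present (non-None) in one pass over rows,
-- then scans the fixed candidate list for the first present field (objective: alternative decomposition).

-- ===== PORT A =====
-- item.get(field) is not None  (first-match assoc lookup = Python dict lookup)
def smmHasField (item : List (String × Option Int)) (f : String) : Bool :=
  match (PySem.Dict.mk item).get? f with
  | some (some _) => true
  | _ => false

-- the 'for field, label in candidates: if any(...): return' loop
def smmLoopA : List (String × String) → List (List (String × Option Int)) → String × String
  | [], _ => ("net_margin", "净利率")
  | (f, l) :: rest, rows =>
      if rows.any (fun item => smmHasField item f) then (f, l) else smmLoopA rest rows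

def select_margin_metric (rows : List (List (String × Option Int))) : String × String :=
  smmLoopA [("gross_margin", "毛利率"), ("operating_margin", "营业利润率"),
            ("net_margin", "净利率")] rows

-- ===== PORT B =====
def smmCandidates : List (String × String) :=
  [("gross_margin", "毛利率"), ("operating_margin", "营业利润率"), ("net_margin", "净利率")]

-- one pass over rows: collect every candidate field whose value is not None
def smmPresent (rows : List (List (String × Option Int))) : PySem.Set String :=
  rows.foldl
    (fun s item =>
      smmCandidates.foldl
        (fun s p => if smmHasField item p.1 then PySem.Set.add s p.1 else s) s)
    PySem.Set.empty

-- 'for field, label in candidates: if field in present: return'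
def smmPick : List (String × String) → PySem.Set String → String × String
  | [], _ => ("net_margin", "净利率")
  | (f, l) :: rest, present =>
      if PySem.Set.contains present f then (f, l) else smmPick rest present

def select_margin_metric_alt (rows : List (List (String × Option Int))) : String × String :=
  smmPick smmCandidates (smmPresent rows)

-- ===== PRECONDITION & SPEC =====
def Spec_select_margin_metric (rows : List (List (String × Option Int))) (out : String × String) : Prop := out = select_margin_metric_alt rows
instance (rows : List (List (String × Option Int))) (out : String × String) : Decidable (Spec_select_margin_metric rows out) := by unfold Spec_select_margin_metric; infer_instance

-- ===== CLAIM (what is proved, stated in full; the proofs are below) =====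
def Claim_equal_select_margin_metric : Prop := ∀ (rows : List (List (String × Option Int))), Dom_select_margin_metric rows → Spec_select_margin_metric rows (select_margin_metric rows)

-- ===== LEMMAS AND PROOFS =====

lemma smm_inner_mem (item : List (String × Option Int)) (s : PySem.Set String) (f : String)
    (hf : f = "gross_margin" ∨ f = "operating_margin" ∨ f = "net_margin") :
    (f ∈ smmCandidates.foldl
        (fun s p => if smmHasField item p.1 then PySem.Set.add s p.1 else s) s)
      ↔ (f ∈ s ∨ smmHasField item f = true) := by
  simp only [smmCandidates, List.foldl]
  rcases hf with h | h | h <;> subst h <;>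
    split_ifs with h1 h2 h3 <;>
      simp_all [PySem.Set.mem_add]

lemma smm_present_mem (rows : List (List (String × Option Int))) (f : String)
    (hf : f = "gross_margin" ∨ f = "operating_margin" ∨ f = "net_margin") :
    ∀ s : PySem.Set String,
      (f ∈ rows.foldl
          (fun s item =>
            smmCandidates.foldl
              (fun s p => if smmHasField item p.1 then PySem.Set.add s p.1 else s) s) s)
        ↔ (f ∈ s ∨ rows.any (fun item => smmHasField item f) = true) := by
  induction rows with
  | nil => simp
  | cons item rest ih =>
      intro s
      simp only [List.foldl_cons, List.any_cons]
      rw [ih, smm_inner_mem item s f hf]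
      simp [or_assoc]

lemma smm_contains_present (rows : List (List (String × Option Int))) (f : String)
    (hf : f = "gross_margin" ∨ f = "operating_margin" ∨ f = "net_margin") :
    PySem.Set.contains (smmPresent rows) f = rows.any (fun item => smmHasField item f) := by
  rw [Bool.eq_iff_iff, PySem.Set.contains_iff]
  unfold smmPresent
  rw [smm_present_mem rows f hf PySem.Set.empty]
  simp [PySem.Set.empty]

-- ===== VERDICT (by name: the statement is the Claim_ definition above) =====
theorem select_margin_metric_spec : Claim_equal_select_margin_metric := by
  intro rows _
  unfold Spec_select_margin_metric select_margin_metric select_margin_metric_alt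
  simp only [smmCandidates, smmPick, smmLoopA]
  rw [smm_contains_present rows _ (Or.inl rfl),
      smm_contains_present rows _ (Or.inr (Or.inl rfl)),
      smm_contains_present rows _ (Or.inr (Or.inr rfl))]
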